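-- pv_equiv track=rewrite | github.com/ddw02141/algorithm_practice_kit | 2020 KAKAO BLIND RECRUITMENT/가사_검색.py | solution
-- ===== SOURCE A (Python) =====
-- import collections
--
-- class Node:
--     def __init__(self):
--         self.next = collections.defaultdict(Node)
--         self.count = 0
--         self.isWord = False
--
--     def insert(self, word):
--         node = self
--         node.count += 1
--         for w in word:
--             node = node.next[w]
--             node.count += 1
--         node.isWord = True
--
--     def getMatchedCount(self, query):
--         node = self
--         for i, q in enumerate(query):
--             if q == '?':
--                 return node.count
--             if q not in node.next:
--                 return 0
--             node = node.next[q]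
--         return 0
--
-- def solution(words, queries):
--     forward_roots = [Node() for _ in range(100_000 + 1)]
--     reverse_roots = [Node() for _ in range(100_000 + 1)]
--     for word in words:
--         forward_roots[len(word)].insert(word)
--         reverse_roots[len(word)].insert(word[::-1])
--     answer = []
--     for query in queries:
--         matchedCount = 0
--         if query[0] != '?':
--             matchedCount += forward_roots[len(query)].getMatchedCount(query)
--         else:
--             matchedCount += reverse_roots[len(query)].getMatchedCount(query[::-1])
--         answer.append(matchedCount)
--     return answer
-- ===== SOURCE B (Python) =====
-- import collections
--
-- def solution(words, queries):
--     # Index every (length, prefix) pair of each word (and of its reverse) in two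
--     # flat counting dicts; each query is then a single O(1) lookup of the prefix
--     # before its first '?' (suffix queries look up the reversed-word index).
--     fwd = {}
--     rev = {}
--     for w in words:
--         L = len(w)
--         rw = w[::-1]
--         for i in range(L + 1):
--             k = (L, w[:i])
--             fwd[k] = fwd.get(k, 0) + 1
--             k2 = (L, rw[:i])
--             rev[k2] = rev.get(k2, 0) + 1
--     answer = []
--     for q in queries:
--         i = q.find('?')
--         if i == -1:
--             answer.append(0)
--             continue
--         if q[0] != '?':
--             answer.append(fwd.get((len(q), q[:i]), 0))
--         else:
--             rq = q[::-1]
--             answer.append(rev.get((len(q), rq[:rq.find('?')]), 0))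
--     return answer
-- ===== Notes on version B (the rewrite author's own statement) =====
-- stated objective: alternative
-- what changed: Replaces A's 2x100001 preallocated arrays of per-character trie nodes with two flat dicts counting every (length, prefix) pair of each word (and of its reverse), so each query becomes a single hash lookup of the prefix before its first '?'; A's quirks (no-'?' queries count 0, only the prefix up to the first '?' matters) are reproduced.
import Mathlib
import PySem

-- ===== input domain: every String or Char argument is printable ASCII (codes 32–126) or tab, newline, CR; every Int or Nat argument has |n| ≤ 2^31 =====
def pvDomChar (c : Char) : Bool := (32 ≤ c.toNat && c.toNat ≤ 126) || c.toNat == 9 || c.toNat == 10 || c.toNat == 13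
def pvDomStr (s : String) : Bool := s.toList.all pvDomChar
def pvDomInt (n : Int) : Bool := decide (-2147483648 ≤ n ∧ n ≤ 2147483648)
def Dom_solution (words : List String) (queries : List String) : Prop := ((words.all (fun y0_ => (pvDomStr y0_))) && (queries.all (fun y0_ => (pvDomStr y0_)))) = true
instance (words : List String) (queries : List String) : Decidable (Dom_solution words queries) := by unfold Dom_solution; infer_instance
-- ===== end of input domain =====

-- B replaces A's per-length forward/reverse tries by two flat dicts counting every
-- (length, prefix) pair of each word and of its reverse, so a query is one lookup of the
-- prefix before its first '?' (objective: alternative; equivalence on Pre_).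

-- ===== PORT A =====
-- A's Node: count + isWord + children (explicit child list; a mutual pair, no nested inductive).
mutual
inductive PTrie where
  | mk : Int → Bool → PChildren → PTrie
inductive PChildren where
  | nil : PChildren
  | cons : Char → PTrie → PChildren → PChildren
end

def PTrie.empty : PTrie := .mk 0 false .nil

-- Node.insert: +1 on every node along the path (defaultdict creates missing children), isWord at the end.
mutual
def PTrie.insert : PTrie → List Char → PTrie
  | .mk n _ ch, [] => .mk (n+1) true ch
  | .mk n b ch, c :: cs => .mk (n+1) b (PChildren.step ch c cs)
  termination_by t cs => (cs.length, 0)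
def PChildren.step : PChildren → Char → List Char → PChildren
  | .nil, c, cs => .cons c (PTrie.insert PTrie.empty cs) .nil
  | .cons c' t rest, c, cs =>
      if c' = c then .cons c' (PTrie.insert t cs) rest else .cons c' t (PChildren.step rest c cs)
  termination_by ch _ cs => (cs.length, 1 + sizeOf ch)
end

-- Node.getMatchedCount: '?' → node.count; missing child → 0; query exhausted → 0.
mutual
def PTrie.getMatched : PTrie → List Char → Int
  | _, [] => 0
  | .mk n _ ch, c :: cs => if c = '?' then n else PChildren.look ch c cs
  termination_by t cs => (cs.length, 0)
def PChildren.look : PChildren → Char → List Char → Int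
  | .nil, _, _ => 0
  | .cons c' t rest, c, cs => if c' = c then PTrie.getMatched t cs else PChildren.look rest c cs
  termination_by ch _ cs => (cs.length, 1 + sizeOf ch)
end

-- roots[i].insert(word): functional update of the list of roots (out of range = Python IndexError, excluded by Pre_).
def updAt {α : Type} : List α → Nat → (α → α) → List α
  | [], _, _ => []
  | t :: ts, 0, f => f t :: ts
  | t :: ts, n+1, f => t :: updAt ts n f

def solution (words : List String) (queries : List String) : List Int :=
  let init : List PTrie := List.replicate 100001 PTrie.empty
  let roots := words.foldl (fun (p : List PTrie × List PTrie) w =>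
      (updAt p.1 w.toList.length (fun t => t.insert w.toList),
       updAt p.2 w.toList.length (fun t => t.insert w.toList.reverse))) (init, init)
  queries.map (fun q =>
    -- query[0]: on the empty query Python raises IndexError (excluded by Pre_)
    if PySem.Str.pyGet? q 0 ≠ some '?' then
      (roots.1.getD q.toList.length PTrie.empty).getMatched q.toList
    else
      (roots.2.getD q.toList.length PTrie.empty).getMatched q.toList.reverse)

-- ===== PORT B =====
-- the word loop maintains two independent dicts; it is ported as two folds over words
def solution_alt (words : List String) (queries : List String) : List Int :=
  let fwd := words.foldl (fun d w =>
      (PySem.List.pyRange 0 ((w.toList.length : Int) + 1) 1).foldl (fun d i =>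
          d.insert ((w.toList.length : Int), PySem.Str.slice w none (some i))
            (d.getD ((w.toList.length : Int), PySem.Str.slice w none (some i)) 0 + 1)) d)
    (PySem.Dict.empty : PySem.Dict (Int × String) Int)
  let rev := words.foldl (fun d w =>
      (PySem.List.pyRange 0 ((w.toList.length : Int) + 1) 1).foldl (fun d i =>
          d.insert ((w.toList.length : Int), PySem.Str.slice (String.ofList w.toList.reverse) none (some i))
            (d.getD ((w.toList.length : Int), PySem.Str.slice (String.ofList w.toList.reverse) none (some i)) 0 + 1)) d)
    (PySem.Dict.empty : PySem.Dict (Int × String) Int)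
  queries.map (fun q =>
    let i := PySem.Str.find q "?"
    if i = -1 then 0
    else if PySem.Str.pyGet? q 0 ≠ some '?' then
      fwd.getD ((q.toList.length : Int), PySem.Str.slice q none (some i)) 0
    else
      rev.getD ((q.toList.length : Int), PySem.Str.slice (String.ofList q.toList.reverse) none
        (some (PySem.Str.find (String.ofList q.toList.reverse) "?"))) 0)

-- ===== PRECONDITION & SPEC =====
-- Pre_ excludes exactly the inputs where A raises IndexError: an empty query (query[0]),
-- or a word/query longer than 100000 (index past the fixed roots arrays).
def Pre_solution (words : List String) (queries : List String) : Prop :=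
  (∀ q ∈ queries, q.toList ≠ [] ∧ q.toList.length ≤ 100000) ∧
  (∀ w ∈ words, w.toList.length ≤ 100000)
instance (words : List String) (queries : List String) : Decidable (Pre_solution words queries) := by
  unfold Pre_solution; infer_instance

def pvWitness_solution : List String × List String := (["abc", "abd", "xyz"], ["ab?", "?bc", "abc", "???"])

def Spec_solution (words : List String) (queries : List String) (out : List Int) : Prop := out = solution_alt words queries
instance (words : List String) (queries : List String) (out : List Int) : Decidable (Spec_solution words queries out) := by unfold Spec_solution; infer_instance

-- ===== CLAIM (what is proved, stated in full; the proofs are below) =====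
def Claim_equal_solution : Prop := ∀ (words : List String) (queries : List String), Dom_solution words queries → Pre_solution words queries → Spec_solution words queries (solution words queries)

-- ===== LEMMAS AND PROOFS =====

theorem mem_iff_singleton_infix {a : Char} {l : List Char} : a ∈ l ↔ [a] <:+: l := by
  constructor
  · intro h
    obtain ⟨s, t, rfl⟩ := List.append_of_mem h
    exact ⟨s, t, by simp⟩
  · rintro ⟨s, t, rfl⟩; simp

theorem prefix_drop_iff {a : Char} {cs : List Char} {k : Nat} (hk : k < cs.length) :
    ([a] <+: cs.drop k) ↔ cs[k] = a := by
  rw [List.drop_eq_getElem_cons hk]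
  constructor
  · rintro ⟨t, ht⟩
    have h2 := congrArg List.head? ht
    simp [List.getElem?_eq_getElem hk] at h2
    exact h2.symm
  · intro h; exact ⟨List.drop (k+1) cs, by rw [h]; rfl⟩

theorem find_eq_neg_one_iff_not_mem {a : Char} {cs : List Char} :
    PySem.Chars.find cs [a] = -1 ↔ a ∉ cs := by
  rw [← not_iff_not, not_not]
  rw [show (¬PySem.Chars.find cs [a] = -1) ↔ PySem.Chars.find cs [a] ≠ -1 from Iff.rfl]
  rw [PySem.Chars.find_ne_neg_one_iff, ← mem_iff_singleton_infix]

theorem takeWhile_eq_take {cs : List Char} {n : Nat} (hn : n < cs.length) (hq : cs[n] = '?')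
    (hmin : ∀ k (hk : k < n), cs[k]'(by omega) ≠ '?') :
    cs.takeWhile (fun c => c ≠ '?') = cs.take n := by
  induction cs generalizing n with
  | nil => simp at hn
  | cons c cs ih =>
    cases n with
    | zero => simp_all [List.takeWhile_cons]
    | succ m =>
      have hc : c ≠ '?' := hmin 0 (by omega)
      simp only [List.takeWhile_cons, List.take_succ_cons]
      rw [if_pos (by simpa using hc)]
      congr 1
      exact ih (by simpa using hn) (by simpa using hq)
        (fun k hk => by simpa using hmin (k+1) (by omega))

theorem take_find_eq_takeWhile {cs : List Char} (h : PySem.Chars.find cs ['?'] ≠ -1) :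
    cs.take (PySem.Chars.find cs ['?']).toNat = cs.takeWhile (fun c => c ≠ '?') ∧ '?' ∈ cs ∧ 0 ≤ PySem.Chars.find cs ['?'] := by
  have h0 : 0 ≤ PySem.Chars.find cs ['?'] := by
    have := PySem.Chars.neg_one_le_find cs ['?']
    omega
  obtain ⟨hpre, hmin⟩ := PySem.Chars.find_spec h0
  set n := (PySem.Chars.find cs ['?']).toNat with hn
  have hlen : n < cs.length := by
    have h1 := hpre.length_le
    simp at h1
    omega
  have hq : cs[n] = '?' := (prefix_drop_iff hlen).1 hpre
  have hm : ∀ k (hk : k < n), cs[k]'(by omega) ≠ '?' := by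
    intro k hk
    have := hmin k hk
    rw [prefix_drop_iff (by omega)] at this
    exact this
  refine ⟨(takeWhile_eq_take hlen hq hm).symm, ?_, h0⟩
  exact hq ▸ List.getElem_mem hlen

theorem length_updAt {α : Type} (l : List α) (i : Nat) (f : α → α) : (updAt l i f).length = l.length := by
  induction l generalizing i with
  | nil => rfl
  | cons t ts ih => cases i <;> simp [updAt, ih]

theorem getD_updAt_self {α : Type} (l : List α) (i : Nat) (f : α → α) (e : α) (h : i < l.length) :
    (updAt l i f).getD i e = f (l.getD i e) := by
  induction l generalizing i with
  | nil => simp at h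
  | cons t ts ih => cases i with
    | zero => simp [updAt]
    | succ n => simpa [updAt] using ih n (by simpa using h)

theorem getD_updAt_ne {α : Type} (l : List α) (i j : Nat) (f : α → α) (e : α) (h : j ≠ i) :
    (updAt l i f).getD j e = l.getD j e := by
  induction l generalizing i j with
  | nil => rfl
  | cons t ts ih => cases i with
    | zero => cases j with
      | zero => exact absurd rfl h
      | succ m => simp [updAt]
    | succ n => cases j with
      | zero => simp [updAt]
      | succ m => simpa [updAt] using ih n m (by omega)

theorem getD_foldl_updAt {α : Type} (key : String → Nat) (F : String → α → α)
    (ws : List String) (l : List α) (L : Nat) (e : α)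
    (hw : ∀ w ∈ ws, key w < l.length) :
    (ws.foldl (fun acc w => updAt acc (key w) (F w)) l).getD L e
      = (ws.filter (fun w => key w == L)).foldl (fun t w => F w t) (l.getD L e) := by
  induction ws generalizing l with
  | nil => simp
  | cons w ws ih =>
    have hwl : key w < l.length := hw w (List.mem_cons_self ..)
    have hrest : ∀ w' ∈ ws, key w' < (updAt l (key w) (F w)).length := by
      intro w' hm; rw [length_updAt]; exact hw w' (List.mem_cons_of_mem _ hm)
    simp only [List.foldl_cons, List.filter_cons]
    by_cases hk : key w = L
    · subst hk
      rw [ih _ hrest, getD_updAt_self _ _ _ _ hwl]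
      simp
    · have hb : (key w == L) = false := by simpa using hk
      rw [ih _ hrest, getD_updAt_ne _ _ _ _ _ (fun h => hk h.symm)]
      simp [hb]

def matchB (w cs : List Char) : Bool :=
  decide ('?' ∈ cs) && (cs.takeWhile (fun c => c ≠ '?')).isPrefixOf w

theorem getMatched_empty (cs : List Char) : PTrie.empty.getMatched cs = 0 := by
  cases cs with
  | nil => simp [PTrie.getMatched]
  | cons c cs => simp [PTrie.empty, PTrie.getMatched, PChildren.look]

theorem look_step (cs : List Char)
    (ih : ∀ t w, (PTrie.insert t w).getMatched cs = t.getMatched cs + (if matchB w cs then 1 else 0)) :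
    (ch : PChildren) → (d c : Char) → (w' : List Char) →
      PChildren.look (PChildren.step ch d w') c cs
        = PChildren.look ch c cs + (if d = c then (if matchB w' cs then 1 else 0) else 0)
  | .nil, d, c, w' => by
    by_cases hd : d = c <;>
      simp [PChildren.step, PChildren.look, hd, ih, getMatched_empty]
  | .cons c' t' rest, d, c, w' => by
    by_cases h1 : c' = d
    · by_cases h2 : c' = c
      · have hd : d = c := h2 ▸ h1 ▸ rfl
        simp [PChildren.step, PChildren.look, h1, h2, hd, ih]
      · have hd : ¬ d = c := by intro h; exact h2 (h1.trans h)
        have hd' : ¬ c = d := fun h => hd h.symm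
        simp [PChildren.step, PChildren.look, h1, h2, hd, hd']
    · by_cases h2 : c' = c
      · have hd : ¬ d = c := by intro h; exact h1 (h ▸ h2)
        have hd' : ¬ c = d := fun h => hd h.symm
        simp [PChildren.step, PChildren.look, h1, h2, hd, hd']
      · simp [PChildren.step, PChildren.look, h1, h2, look_step cs ih rest d c w']

theorem insert_getMatched (cs : List Char) (t : PTrie) (w : List Char) :
    (t.insert w).getMatched cs = t.getMatched cs + (if matchB w cs then 1 else 0) := by
  induction cs generalizing t w with
  | nil =>
    cases t with | mk n b ch =>
    cases w <;> simp [PTrie.insert, PTrie.getMatched, matchB]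
  | cons c cs ih =>
    cases t with | mk n b ch =>
    cases w with
    | nil =>
      by_cases hc : c = '?' <;>
        simp [PTrie.insert, PTrie.getMatched, matchB, hc, List.takeWhile, List.isPrefixOf]
    | cons d w' =>
      by_cases hc : c = '?'
      · simp [PTrie.insert, PTrie.getMatched, matchB, hc, List.takeWhile]
      · simp only [PTrie.insert, PTrie.getMatched, if_neg hc]
        have hmem : ('?' ∈ c :: cs) = ('?' ∈ cs) := by
          simp only [List.mem_cons, eq_self_iff_true]
          refine propext ⟨fun h => ?_, fun h => Or.inr h⟩
          rcases h with h | h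
          · exact absurd h.symm hc
          · exact h
        have hm : matchB (d :: w') (c :: cs) = (if d = c then matchB w' cs else false) := by
          by_cases hd : d = c
          · subst hd
            simp [matchB, List.takeWhile_cons, hc, List.isPrefixOf_cons₂, hmem]
          · have hd' : ¬ c = d := fun h => hd h.symm
            simp [matchB, List.takeWhile_cons, hc, List.isPrefixOf_cons₂, hd, hd', hmem]
        rw [hm]
        have := look_step cs (fun t w => ih t w) ch d c w'
        by_cases hd : d = c <;> simp [hd] at this ⊢ <;> omega
theorem foldl_insert_getMatched (ws : List (List Char)) (t : PTrie) (cs : List Char) :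
    (ws.foldl PTrie.insert t).getMatched cs = t.getMatched cs + (ws.countP (fun w => matchB w cs) : Int) := by
  induction ws generalizing t with
  | nil => simp
  | cons w ws ih =>
    simp only [List.foldl_cons, ih, insert_getMatched, List.countP_cons]
    by_cases h : matchB w cs <;> simp [h] <;> push_cast <;> ring


theorem getD_replicate_empty (n L : Nat) :
    (List.replicate n PTrie.empty).getD L PTrie.empty = PTrie.empty := by
  rcases Nat.lt_or_ge L n with h | h
  · simp [List.getD, List.getElem?_replicate, h]
  · simp [List.getD, List.getElem?_replicate, Nat.not_lt.2 h]

-- A-side: the trie at index L of the folded roots counts the matching words.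
theorem trie_eval (words : List String) (proj : String → List Char) (ds : List Char) (L : Nat)
    (hw : ∀ w ∈ words, w.toList.length ≤ 100000) :
    ((words.foldl (fun acc w => updAt acc w.toList.length (fun t => t.insert (proj w)))
        (List.replicate 100001 PTrie.empty)).getD L PTrie.empty).getMatched ds
      = ((words.filter (fun w => w.toList.length == L)).countP (fun w => matchB (proj w) ds) : Int) := by
  rw [getD_foldl_updAt (fun w => w.toList.length) (fun w t => t.insert (proj w)) words _ L PTrie.empty
      (by intro w hm; simp only [List.length_replicate]; exact Nat.lt_succ_of_le (hw w hm))]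
  rw [getD_replicate_empty]
  have hfm : (List.filter (fun w => w.toList.length == L) words).foldl
      (fun t w => t.insert (proj w)) PTrie.empty
      = ((List.filter (fun w => w.toList.length == L) words).map proj).foldl PTrie.insert PTrie.empty := by
    rw [List.foldl_map]
  rw [hfm, foldl_insert_getMatched, getMatched_empty, List.countP_map]
  simp only [zero_add]
  congr 1

theorem countP_range_eq (n : Nat) (P : Nat → Bool) (k : Nat)
    (hk : ∀ j, j < n → P j = true → j = k) :
    (List.range n).countP P = if k < n ∧ P k = true then 1 else 0 := by
  induction n with
  | zero => simp
  | succ m ih =>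
    rw [List.range_succ, List.countP_append]
    rw [ih (fun j hj hP => hk j (by omega) hP)]
    by_cases hPm : P m = true
    · have hkm : m = k := hk m (by omega) hPm
      subst hkm
      simp [hPm]
    · have hiff : (k < m ∧ P k = true) ↔ (k < m + 1 ∧ P k = true) := by
        constructor
        · rintro ⟨a, b⟩; exact ⟨by omega, b⟩
        · rintro ⟨a, b⟩
          refine ⟨?_, b⟩
          rcases Nat.lt_or_ge k m with h | h
          · exact h
          · have hkm : k = m := by omega
            rw [hkm] at b; exact absurd b hPm
      simp [hPm, hiff]

theorem count_prefKeys (L : Nat) (s : String) (hLs : s.toList.length = L) (M : Nat) (p : String) :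
    (((PySem.List.pyRange 0 ((L : Int) + 1) 1).map
        (fun i => ((L : Int), PySem.Str.slice s none (some i)))).count ((M : Int), p))
      = if L = M ∧ p.toList <+: s.toList then 1 else 0 := by
  have hcast : ((L : Int) + 1) = ((L + 1 : Nat) : Int) := by push_cast; ring
  rw [hcast, PySem.List.pyRange_zero_natCast, List.map_map, List.count_eq_countP, List.countP_map]
  have hsl : ∀ (j : Nat), (PySem.Str.slice s none (some ((j : Nat) : Int))).toList = s.toList.take j := by
    intro j
    rw [PySem.Str.toList_slice, PySem.Chars.slice_eq_listSlice, PySem.List.slice_to_natCast]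
  have hPiff : ∀ (j : Nat),
      ((fun x => x == ((M : Int), p)) ∘ (fun i => ((L : Int), PySem.Str.slice s none (some i))) ∘ (fun k : Nat => (k : Int))) j = true
        ↔ (L = M ∧ s.toList.take j = p.toList) := by
    intro j
    simp only [Function.comp_apply, beq_iff_eq, Prod.mk.injEq]
    constructor
    · rintro ⟨h1, h2⟩
      refine ⟨by exact_mod_cast h1, ?_⟩
      rw [← hsl j, h2]
    · rintro ⟨h1, h2⟩
      refine ⟨by exact_mod_cast h1, ?_⟩
      apply String.toList_inj.1
      rw [hsl j, h2]
  rw [countP_range_eq (L+1) _ p.toList.length ?hk]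
  case hk =>
    intro j hj hP
    obtain ⟨h1, h2⟩ := (hPiff j).1 hP
    have : (s.toList.take j).length = p.toList.length := by rw [h2]
    simpa [hLs, Nat.min_eq_left (by omega : j ≤ L)] using this
  by_cases hc : L = M ∧ p.toList <+: s.toList
  · rw [if_pos hc, if_pos]
    refine ⟨?_, (hPiff _).2 ⟨hc.1, ?_⟩⟩
    · have := hc.2.length_le; omega
    · exact (List.prefix_iff_eq_take.1 hc.2).symm
  · rw [if_neg hc, if_neg]
    rintro ⟨hlt, hP⟩
    obtain ⟨h1, h2⟩ := (hPiff _).1 hP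
    exact hc ⟨h1, List.prefix_iff_eq_take.2 h2.symm⟩

theorem getD_prefix_index (g : String → String) (hg : ∀ w, (g w).toList.length = w.toList.length)
    (ws : List String) (d : PySem.Dict (Int × String) Int) (M : Nat) (p : String) :
    (ws.foldl (fun d w => (PySem.List.pyRange 0 ((w.toList.length : Int) + 1) 1).foldl
        (fun d i => d.insert ((w.toList.length : Int), PySem.Str.slice (g w) none (some i))
            (d.getD ((w.toList.length : Int), PySem.Str.slice (g w) none (some i)) 0 + 1)) d) d).getD ((M : Int), p) 0
    = d.getD ((M : Int), p) 0
      + ((ws.countP (fun w => w.toList.length == M && p.toList.isPrefixOf (g w).toList)) : Int) := by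
  induction ws generalizing d with
  | nil => simp
  | cons w ws ih =>
    rw [List.foldl_cons, ih]
    have hmap : (PySem.List.pyRange 0 ((w.toList.length : Int) + 1) 1).foldl
        (fun d i => d.insert ((w.toList.length : Int), PySem.Str.slice (g w) none (some i))
            (d.getD ((w.toList.length : Int), PySem.Str.slice (g w) none (some i)) 0 + 1)) d
        = ((PySem.List.pyRange 0 ((w.toList.length : Int) + 1) 1).map
            (fun i => ((w.toList.length : Int), PySem.Str.slice (g w) none (some i)))).foldl
          (fun d k => d.insert k (d.getD k 0 + 1)) d := by
      rw [List.foldl_map]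
    rw [hmap, PySem.Dict.getD_foldl_insert_add_one,
        count_prefKeys w.toList.length (g w) (hg w) M p]
    have hpred : (w.toList.length == M && p.toList.isPrefixOf ((g w).toList) : Bool) = true
        ↔ (w.toList.length = M ∧ p.toList <+: (g w).toList) := by
      simp [List.isPrefixOf_iff_prefix]
    rw [List.countP_cons]
    by_cases hc : w.toList.length = M ∧ p.toList <+: (g w).toList
    · rw [if_pos hc, if_pos (hpred.2 hc)]
      push_cast; ring
    · rw [if_neg hc, if_neg (fun h => hc (hpred.1 h))]
      push_cast; ring

-- ===== VERDICT (by name: the statement is the Claim_ definition above) =====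
set_option maxHeartbeats 1000000 in
theorem solution_spec : Claim_equal_solution := by
  intro words queries hdom hpre
  unfold Spec_solution
  obtain ⟨hq, hwlen⟩ := hpre
  simp only [solution, solution_alt]
  have hA := PySem.List.foldl_prod_mk
      (f := fun acc w => updAt acc w.toList.length (fun t => t.insert w.toList))
      (g := fun acc w => updAt acc w.toList.length (fun t => t.insert w.toList.reverse))
      (l := words) (a := List.replicate 100001 PTrie.empty) (b := List.replicate 100001 PTrie.empty)
  simp only [] at hA
  rw [hA]
  refine List.map_congr_left (fun q hqm => ?_)
  obtain ⟨hqne, hqlen⟩ := hq q hqm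
  have hql : "?".toList = ['?'] := by decide
  by_cases hfind : PySem.Str.find q "?" = -1
  · -- no '?': A counts nothing, B returns 0
    rw [if_pos hfind]
    have hfind' : PySem.Chars.find q.toList ['?'] = -1 := by
      rw [PySem.Str.find_eq, hql] at hfind; exact hfind
    have hnm : '?' ∉ q.toList := find_eq_neg_one_iff_not_mem.1 hfind'
    have hzero : ∀ (proj : String → List Char) (ds : List Char), '?' ∉ ds →
        ∀ L, ((words.foldl (fun acc w => updAt acc w.toList.length (fun t => t.insert (proj w)))
          (List.replicate 100001 PTrie.empty)).getD L PTrie.empty).getMatched ds = 0 := by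
      intro proj ds hds L
      rw [trie_eval words proj ds L hwlen]
      rw [List.countP_eq_zero.2 (fun w _ => by simp [matchB, hds])]
      rfl
    split_ifs with hq0
    · exact hzero (fun w => w.toList) q.toList hnm q.toList.length
    · exact hzero (fun w => w.toList.reverse) q.toList.reverse
        (by simpa using hnm) q.toList.length
  · rw [if_neg hfind]
    have hfind' : PySem.Chars.find q.toList ['?'] ≠ -1 := by
      rw [PySem.Str.find_eq, hql] at hfind; exact hfind
    obtain ⟨htake, hmemq, h0⟩ := take_find_eq_takeWhile hfind'
    by_cases hq0 : PySem.Str.pyGet? q 0 ≠ some '?'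
    · rw [if_pos hq0, if_pos hq0]
      rw [trie_eval words (fun w => w.toList) q.toList q.toList.length hwlen]
      have hbp := getD_prefix_index (fun w => w) (fun w => rfl) words PySem.Dict.empty
        q.toList.length (PySem.Str.slice q none (some (PySem.Str.find q "?")))
      simp only [] at hbp
      rw [hbp]
      have hp : (PySem.Str.slice q none (some (PySem.Str.find q "?"))).toList
          = q.toList.takeWhile (fun c => c ≠ '?') := by
        rw [PySem.Str.toList_slice, PySem.Chars.slice_eq_listSlice,
            PySem.Str.find_eq, hql, PySem.List.slice_to _ h0]
        exact htake
      have hempty : (PySem.Dict.empty : PySem.Dict (Int × String) Int).getD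
          ((q.toList.length : Int), PySem.Str.slice q none (some (PySem.Str.find q "?"))) 0 = 0 := by
        simp [PySem.Dict.empty, PySem.Dict.getD, PySem.Dict.get?]
      rw [hempty, zero_add, List.countP_filter]
      congr 1
      refine List.countP_congr (fun w _ => ?_)
      rw [hp]
      simp [matchB, hmemq, and_comm]
    · rw [if_neg hq0, if_neg hq0]
      rw [not_not] at hq0
      have hmem0 : '?' ∈ q.toList := by
        have h := hq0
        rw [show (0:Int) = ((0:Nat):Int) from rfl, PySem.Str.pyGet?_natCast q 0] at h
        exact List.mem_of_getElem? h
      have hmemr : '?' ∈ q.toList.reverse := by simpa using hmem0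
      have hrtl : (String.ofList q.toList.reverse).toList = q.toList.reverse := String.toList_ofList
      have hfr : PySem.Chars.find q.toList.reverse ['?'] ≠ -1 := by
        intro hc; exact (find_eq_neg_one_iff_not_mem.1 hc) hmemr
      obtain ⟨htr, hmr, h0r⟩ := take_find_eq_takeWhile hfr
      rw [trie_eval words (fun w => w.toList.reverse) q.toList.reverse q.toList.length hwlen]
      have hbp := getD_prefix_index (fun w => String.ofList w.toList.reverse)
        (fun w => by rw [String.toList_ofList]; exact List.length_reverse ..) words PySem.Dict.empty
        q.toList.length (PySem.Str.slice (String.ofList q.toList.reverse) none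
          (some (PySem.Str.find (String.ofList q.toList.reverse) "?")))
      simp only [] at hbp
      rw [hbp]
      have hp : (PySem.Str.slice (String.ofList q.toList.reverse) none
          (some (PySem.Str.find (String.ofList q.toList.reverse) "?"))).toList
          = q.toList.reverse.takeWhile (fun c => c ≠ '?') := by
        rw [PySem.Str.toList_slice, PySem.Chars.slice_eq_listSlice,
            PySem.Str.find_eq, hql, hrtl]
        rw [PySem.List.slice_to _ h0r]
        exact htr
      have hempty : (PySem.Dict.empty : PySem.Dict (Int × String) Int).getD
          ((q.toList.length : Int), PySem.Str.slice (String.ofList q.toList.reverse) none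
            (some (PySem.Str.find (String.ofList q.toList.reverse) "?"))) 0 = 0 := by
        simp [PySem.Dict.empty, PySem.Dict.getD, PySem.Dict.get?]
      rw [hempty]
      rw [zero_add]
      rw [List.countP_filter]
      refine congrArg (Nat.cast : Nat → Int) (List.countP_congr (fun w _ => ?_))
      rw [hp]
      simp [matchB, hmr, String.toList_ofList, and_comm]
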